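-- pv_equiv track=rewrite | github.com/ilia-stepanov/leetcode | 0049. Group Anagrams.py | getHashUsingPrimeHashing
-- ===== SOURCE A (Python) =====
-- def getHashUsingPrimeHashing(s: str) -> int:
--     prime_numbers = [
--         2, 3, 5, 7, 11, 13, 17, 19, 23, 29, 31, 37, 41, 43,
--         47, 53, 59, 61, 67, 71, 73, 79, 83, 89, 97, 101]
--     s_value = 1
--     for index, value in enumerate(s):
--         s_value *= prime_numbers[ord(value)-97]
--     return s_value
-- ===== SOURCE B (Python) =====
-- def getHashUsingPrimeHashing(s: str) -> int:
--     # Alternative decomposition: count characters once, then multiply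
--     # prime ** count per distinct character (one lookup per distinct char).
--     prime_numbers = [
--         2, 3, 5, 7, 11, 13, 17, 19, 23, 29, 31, 37, 41, 43,
--         47, 53, 59, 61, 67, 71, 73, 79, 83, 89, 97, 101]
--     counts = {}
--     for c in s:
--         counts[c] = counts.get(c, 0) + 1
--     h = 1
--     for c, k in counts.items():
--         h *= prime_numbers[ord(c) - 97] ** k
--     return h
-- ===== Notes on version B (the rewrite author's own statement) =====
-- stated objective: alternative
-- what changed: B aggregates a character-frequency map in one pass and computes the hash as a product of prime**count over distinct characters, instead of multiplying one prime per character occurrence.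
import Mathlib
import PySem

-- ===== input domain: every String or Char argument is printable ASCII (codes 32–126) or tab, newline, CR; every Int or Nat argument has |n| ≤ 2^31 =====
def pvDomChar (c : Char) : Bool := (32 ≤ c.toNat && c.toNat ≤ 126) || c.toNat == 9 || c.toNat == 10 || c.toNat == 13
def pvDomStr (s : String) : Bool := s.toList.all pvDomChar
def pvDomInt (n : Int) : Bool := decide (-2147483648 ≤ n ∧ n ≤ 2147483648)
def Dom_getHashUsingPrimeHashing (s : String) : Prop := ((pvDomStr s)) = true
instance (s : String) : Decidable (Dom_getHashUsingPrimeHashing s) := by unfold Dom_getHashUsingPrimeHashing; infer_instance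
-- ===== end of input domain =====

-- B replaces A's per-occurrence prime multiplication by a character-frequency map
-- and a product of prime**count over distinct characters (alternative decomposition).


-- ===== PORT A =====
def pvPrimes : List Int :=
  [2, 3, 5, 7, 11, 13, 17, 19, 23, 29, 31, 37, 41, 43,
   47, 53, 59, 61, 67, 71, 73, 79, 83, 89, 97, 101]

-- A: for index, value in enumerate(s): s_value *= prime_numbers[ord(value)-97]
-- (pyGetD is the total form of xs[i]; Pre_ below excludes exactly the IndexError inputs)
def getHashUsingPrimeHashing (s : String) : Int :=
  (PySem.List.enumerate s.toList).foldl
    (fun s_value p => s_value * PySem.List.pyGetD pvPrimes ((p.2.toNat : Int) - 97) 0) 1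

-- ===== PORT B =====
def getHashUsingPrimeHashing_alt (s : String) : Int :=
  let counts := s.toList.foldl (fun d c => d.insert c (d.getD c 0 + 1)) (PySem.Dict.empty : PySem.Dict Char Int)
  counts.items.foldl
    (fun h p => h * PySem.List.pyGetD pvPrimes ((p.1.toNat : Int) - 97) 0 ^ p.2.toNat) 1

-- ===== PRECONDITION & SPEC =====
-- Pre_ excludes exactly the inputs where prime_numbers[ord(c)-97] raises IndexError
-- (a character with code < 71 or > 122); A returns normally on all other strings.
def Pre_getHashUsingPrimeHashing (s : String) : Prop :=
  (s.toList.all (fun c => 71 ≤ c.toNat && c.toNat ≤ 122)) = true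
instance (s : String) : Decidable (Pre_getHashUsingPrimeHashing s) := by
  unfold Pre_getHashUsingPrimeHashing; infer_instance

def pvWitness_getHashUsingPrimeHashing : String := "banana"

def Spec_getHashUsingPrimeHashing (s : String) (out : Int) : Prop := out = getHashUsingPrimeHashing_alt s
instance (s : String) (out : Int) : Decidable (Spec_getHashUsingPrimeHashing s out) := by unfold Spec_getHashUsingPrimeHashing; infer_instance

-- ===== CLAIM (what is proved, stated in full; the proofs are below) =====
def Claim_equal_getHashUsingPrimeHashing : Prop := ∀ (s : String), Dom_getHashUsingPrimeHashing s → Pre_getHashUsingPrimeHashing s → Spec_getHashUsingPrimeHashing s (getHashUsingPrimeHashing s)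

-- ===== LEMMAS AND PROOFS =====

def pvF (c : Char) : Int := PySem.List.pyGetD pvPrimes ((c.toNat : Int) - 97) 0

theorem pv_foldl_mul {α : Type} (g : α → Int) (l : List α) (a : Int) :
    l.foldl (fun h x => h * g x) a = a * (l.map g).prod := by
  induction l generalizing a with
  | nil => simp
  | cons x t ih => simp [ih, mul_assoc]

theorem pv_A_eq (s : String) :
    getHashUsingPrimeHashing s = (s.toList.map pvF).prod := by
  unfold getHashUsingPrimeHashing
  have h := pv_foldl_mul (fun p : Int × Char => pvF p.2) (PySem.List.enumerate s.toList) 1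
  simp only [pvF] at h
  rw [h, one_mul]
  conv_rhs => rw [← PySem.List.map_snd_enumerate s.toList 0]
  rw [List.map_map]
  rfl

theorem pv_dedup_prod_pow (l : List Char) :
    ((PySem.Set.ofList l).map (fun c => pvF c ^ l.count c)).prod = (l.map pvF).prod := by
  have hperm : (PySem.Set.ofList l).Perm l.dedup := by
    apply List.perm_of_nodup_nodup_toFinset_eq (PySem.Set.nodup_ofList l) l.nodup_dedup
    apply Finset.ext
    intro a
    simp [List.mem_toFinset, PySem.Set.mem_ofList, List.mem_dedup]
  calc ((PySem.Set.ofList l).map (fun c => pvF c ^ l.count c)).prod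
      = (l.dedup.map (fun c => pvF c ^ l.count c)).prod := (hperm.map _).prod_eq
    _ = ∏ c ∈ l.toFinset, pvF c ^ l.count c := by
        rw [Finset.prod]
        simp [List.toFinset, Multiset.toFinset]
    _ = (l.map pvF).prod := by
        have := Finset.prod_multiset_map_count (l : Multiset Char) pvF
        simpa using this.symm

theorem pv_B_eq (s : String) :
    getHashUsingPrimeHashing_alt s = (s.toList.map pvF).prod := by
  rw [show getHashUsingPrimeHashing_alt s
        = List.foldl (fun h p => h * pvF p.1 ^ p.2.toNat) 1 (PySem.Dict.counter s.toList).items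
      from rfl,
     PySem.Dict.items_counter]
  have h := pv_foldl_mul (fun p : Char × Int => pvF p.1 ^ p.2.toNat)
    ((PySem.Set.ofList s.toList).map (fun k => (k, (s.toList.count k : Int)))) 1
  rw [h, one_mul, List.map_map]
  simpa [pvF, Function.comp] using pv_dedup_prod_pow s.toList

-- ===== VERDICT (by name: the statement is the Claim_ definition above) =====
theorem getHashUsingPrimeHashing_spec : Claim_equal_getHashUsingPrimeHashing := by
  intro s _ _
  unfold Spec_getHashUsingPrimeHashing
  rw [pv_A_eq, pv_B_eq]
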